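-- pv_equiv track=rewrite | github.com/tldms0327/Algorithm | 백준/12100_2048(Easy).py | push_sum
-- ===== SOURCE A (Python) =====
-- def push_sum(arr, size):
--     new_arr = []
--     for a in arr:
--         if a == 0:
--             continue
--         elif new_arr and new_arr[-1][0] == a and not new_arr[-1][1]:
--             b, flag = new_arr.pop()
--             new_arr.append([a + b, True])
--         else:
--             new_arr.append([a, False])
--
--     return [x[0] for x in new_arr] + [0 for _ in range(size - len(new_arr))]
-- ===== SOURCE B (Python) =====
-- def push_sum(arr, size):
--     nums = [a for a in arr if a != 0]
--     merged = []
--     i = 0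
--     n = len(nums)
--     while i < n:
--         if i + 1 < n and nums[i] == nums[i + 1]:
--             merged.append(nums[i] + nums[i + 1])
--             i += 2
--         else:
--             merged.append(nums[i])
--             i += 1
--     return merged + [0] * (size - len(merged))
-- ===== Notes on version B (the rewrite author's own statement) =====
-- stated objective: simpler
-- what changed: Replaces A's stack-with-merged-flag single pass by a compact-then-pairwise-merge decomposition: filter out zeros first, then an index loop that merges equal adjacent pairs (consuming two tiles per merge), then pad with zeros.
import Mathlib
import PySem

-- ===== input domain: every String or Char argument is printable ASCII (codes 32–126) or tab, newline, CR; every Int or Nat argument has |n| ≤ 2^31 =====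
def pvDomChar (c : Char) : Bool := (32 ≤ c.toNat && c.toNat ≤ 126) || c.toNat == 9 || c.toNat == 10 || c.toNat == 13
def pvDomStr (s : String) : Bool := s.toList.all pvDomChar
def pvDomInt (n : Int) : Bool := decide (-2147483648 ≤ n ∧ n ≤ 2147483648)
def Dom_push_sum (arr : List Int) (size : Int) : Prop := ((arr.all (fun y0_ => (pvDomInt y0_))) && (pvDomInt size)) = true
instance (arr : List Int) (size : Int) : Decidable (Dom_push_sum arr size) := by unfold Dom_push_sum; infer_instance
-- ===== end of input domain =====

-- B replaces A's stack-with-merged-flag single pass by a compact-then-pairwise-merge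
-- decomposition (filter zeros, recursively merge equal adjacent pairs, pad); objective: simpler.

-- ===== PORT A =====
-- one step of A's loop body: skip zeros; merge into an unmerged equal last tile; else push
def pvStepA (st : List (Int × Bool)) (a : Int) : List (Int × Bool) :=
  if a = 0 then st
  else
    match st.getLast? with
    | some (b, flag) =>
        if b = a ∧ flag = false then st.dropLast ++ [(a + b, true)]
        else st ++ [(a, false)]
    | none => st ++ [(a, false)]

def push_sum (arr : List Int) (size : Int) : List Int :=
  let new_arr := arr.foldl pvStepA []
  new_arr.map Prod.fst
    ++ (PySem.List.pyRange 0 (size - (new_arr.length : Int)) 1).map (fun _ => 0)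

-- ===== PORT B =====
def pvMerge : List Int → List Int
  | [] => []
  | [x] => [x]
  | x :: y :: rest => if x = y then (x + y) :: pvMerge rest else x :: pvMerge (y :: rest)

def push_sum_alt (arr : List Int) (size : Int) : List Int :=
  let merged := pvMerge (arr.filter (fun a => a ≠ 0))
  merged ++ List.replicate (size - (merged.length : Int)).toNat 0

-- ===== PRECONDITION & SPEC =====
def Spec_push_sum (arr : List Int) (size : Int) (out : List Int) : Prop := out = push_sum_alt arr size
instance (arr : List Int) (size : Int) (out : List Int) : Decidable (Spec_push_sum arr size out) := by unfold Spec_push_sum; infer_instance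

-- ===== CLAIM (what is proved, stated in full; the proofs are below) =====
def Claim_equal_push_sum : Prop := ∀ (arr : List Int) (size : Int), Dom_push_sum arr size → Spec_push_sum arr size (push_sum arr size)

-- ===== LEMMAS AND PROOFS =====

theorem pvStepA_zero (st : List (Int × Bool)) : pvStepA st 0 = st := by simp [pvStepA]

-- A's fold ignores zeros: folding over arr = folding over the zero-free compaction
theorem pvFold_filter (arr : List Int) : ∀ st : List (Int × Bool),
    arr.foldl pvStepA st = (arr.filter (fun a => a ≠ 0)).foldl pvStepA st := by
  induction arr with
  | nil => intro st; rfl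
  | cons a rest ih =>
      intro st
      by_cases h : a = 0
      · subst h; simp [pvStepA_zero, ih st]
      · simp [List.filter, h, ih (pvStepA st a)]

theorem pvStepA_ne_nil (st : List (Int × Bool)) (a : Int) (h : st ≠ []) :
    pvStepA st a ≠ [] := by
  unfold pvStepA
  split
  · exact h
  · split
    · split <;> simp
    · simp

theorem pvStepA_append (st₁ st₂ : List (Int × Bool)) (a : Int) (h : st₂ ≠ []) :
    pvStepA (st₁ ++ st₂) a = st₁ ++ pvStepA st₂ a := by
  unfold pvStepA
  rw [List.getLast?_append_of_ne_nil st₁ h, List.dropLast_append_of_ne_nil h]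
  split
  · rfl
  · split
    · split <;> simp
    · simp

-- buried elements of the stack are never touched again
theorem pvBurial (l : List Int) : ∀ (st₁ st₂ : List (Int × Bool)), st₂ ≠ [] →
    List.foldl pvStepA (st₁ ++ st₂) l = st₁ ++ List.foldl pvStepA st₂ l := by
  induction l with
  | nil => intro st₁ st₂ h; rfl
  | cons a rest ih =>
      intro st₁ st₂ h
      simp only [List.foldl_cons]
      rw [pvStepA_append st₁ st₂ a h, ih st₁ (pvStepA st₂ a) (pvStepA_ne_nil st₂ a h)]

-- after a merged (flag-true) tile, the rest of the fold starts fresh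
theorem pvFresh (b : Int) (l : List Int) (hl : ∀ x ∈ l, x ≠ 0) :
    List.foldl pvStepA [(b, true)] l = (b, true) :: List.foldl pvStepA [] l := by
  cases l with
  | nil => rfl
  | cons c rest =>
      have hc : c ≠ 0 := hl c (by simp)
      simp only [List.foldl_cons]
      have h1 : pvStepA [(b, true)] c = [(b, true)] ++ [(c, false)] := by
        simp [pvStepA, hc]
      have h2 : pvStepA ([] : List (Int × Bool)) c = [(c, false)] := by
        simp [pvStepA, hc]
      rw [h1, h2, pvBurial rest [(b, true)] [(c, false)] (by simp)]
      rfl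

-- the values on A's stack after a zero-free fold are exactly B's pairwise merge
theorem pvFold_merge : ∀ l : List Int, (∀ x ∈ l, x ≠ 0) →
    (List.foldl pvStepA [] l).map Prod.fst = pvMerge l := by
  intro l
  induction l using pvMerge.induct with
  | case1 => intro _; rfl
  | case2 x =>
      intro h
      have hx : x ≠ 0 := h x (by simp)
      simp [pvStepA, hx, pvMerge]
  | case3 y rest ih =>
      intro h
      have hy : y ≠ 0 := h y (by simp)
      have hrest : ∀ z ∈ rest, z ≠ 0 := fun z hz => h z (by simp [hz])
      simp only [List.foldl_cons]
      have h1 : pvStepA ([] : List (Int × Bool)) y = [(y, false)] := by simp [pvStepA, hy]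
      have h2 : pvStepA [(y, false)] y = [(y + y, true)] := by simp [pvStepA, hy]
      rw [h1, h2, pvFresh (y + y) rest hrest]
      simp only [List.map_cons, ih hrest, pvMerge]
      simp
  | case4 x y rest hxy ih =>
      intro h
      have hx : x ≠ 0 := h x (by simp)
      have hy : y ≠ 0 := h y (by simp)
      have htail : ∀ z ∈ y :: rest, z ≠ 0 := fun z hz => h z (by simp at hz ⊢; tauto)
      simp only [List.foldl_cons]
      have h1 : pvStepA ([] : List (Int × Bool)) x = [(x, false)] := by simp [pvStepA, hx]
      have h2 : pvStepA [(x, false)] y = [(x, false)] ++ [(y, false)] := by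
        simp only [pvStepA, if_neg hy]
        simp only [List.getLast?_singleton]
        rw [if_neg]
        simp only [not_and]
        intro hyx
        exact fun _ => hxy hyx
      have h3 : pvStepA ([] : List (Int × Bool)) y = [(y, false)] := by simp [pvStepA, hy]
      rw [h1, h2, pvBurial rest [(x, false)] [(y, false)] (by simp)]
      have := ih htail
      simp only [List.foldl_cons, h3] at this
      simp only [List.map_append, this]
      rw [pvMerge, if_neg hxy]
      rfl

theorem pvPad (k : Int) :
    (PySem.List.pyRange 0 k 1).map (fun _ => (0 : Int)) = List.replicate k.toNat 0 := by
  rw [List.map_const']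
  rw [show (PySem.List.pyRange 0 k 1).length = k.toNat by
    simp [PySem.List.length_pyRange_one 0 k]]

-- ===== VERDICT (by name: the statement is the Claim_ definition above) =====
theorem push_sum_spec : Claim_equal_push_sum := by
  intro arr size _
  unfold Spec_push_sum
  simp only [push_sum, push_sum_alt]
  have hnz : ∀ x ∈ arr.filter (fun a => a ≠ 0), x ≠ 0 := by
    intro x hx
    simp only [List.mem_filter, decide_eq_true_eq] at hx
    exact hx.2
  have hmap := pvFold_merge (arr.filter (fun a => a ≠ 0)) hnz
  rw [pvFold_filter arr [], pvPad, hmap, ← hmap, List.length_map]
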